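-- pv_equiv track=rewrite | github.com/Lukasz-G/Hydra | Hydra/Utils.py | generator_for_tagging
-- ===== SOURCE A (Python) =====
-- def generator_for_tagging(text_in_list=None,
--                           batch_size = None,
--                           context_size = None
--                           ):
--
--     for z in range(len(text_in_list)):
--
--         if z % batch_size == 0:
--             tokens, context_left_list, context_right_list = [], [], []
--
--             for x in range(batch_size):
--                 y = z + x
--                 try:
--                     token = text_in_list[y]
--                     tokens.append(token)
--                 except:
--                     continue
--
--                 if (y-context_size) < 0:
--                     context_left_1 = text_in_list[(y-context_size):]
--                     context_left_2 = text_in_list[:y]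
--                     context_left = context_left_1 +context_left_2
--
--                 else:
--                     context_left = text_in_list[(y-context_size):y]
--
--                 context_left_list.append(context_left)
--
--
--
--
--                 if y+context_size <= len(text_in_list):
--                     context_right = text_in_list[y:y+context_size]
--
--                 else:
--                     context_right_1 = text_in_list[y:]
--                     context_right_2 = text_in_list[:context_size-(len(text_in_list)-y)]
--                     context_right = context_right_1 + context_right_2
--
--                 context_right_list.append(context_right)
--
--             yield tokens, context_left_list, context_right_list
-- ===== SOURCE B (Python) =====
-- def _windows(text_in_list, y, context_size):
--     n = len(text_in_list)
--     if (y - context_size) < 0: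
--         left = text_in_list[(y - context_size):] + text_in_list[:y]
--     else:
--         left = text_in_list[(y - context_size):y]
--     if y + context_size <= n:
--         right = text_in_list[y:y + context_size]
--     else:
--         right = text_in_list[y:] + text_in_list[:context_size - (n - y)]
--     return left, right
--
--
-- def generator_for_tagging(text_in_list=None,
--                           batch_size=None,
--                           context_size=None
--                           ):
--     # one flat pass: a triple (token, left window, right window) per position
--     flat = []
--     for y, token in enumerate(text_in_list):
--         left, right = _windows(text_in_list, y, context_size)
--         flat.append((token, left, right))
--     # regrouping pass: cut the flat list into batches of batch_size
--     for i in range(0, len(flat), batch_size):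
--         chunk = flat[i:i + batch_size]
--         yield ([t for t, _, _ in chunk],
--                [l for _, l, _ in chunk],
--                [r for _, _, r in chunk])
-- ===== Notes on version B (the rewrite author's own statement) =====
-- stated objective: alternative
-- what changed: Replaces A's nested batch loop with try/except index probing by a single flat pass building one (token,left,right) triple per position, then a regrouping pass stepping range(0, len, batch_size) and slicing; Pre_ restricts batch_size to the natural domain of positive counts (A raises ZeroDivisionError at 0 on nonempty input; for negative batch_size neither behaviour is specified — A yields empty triples at every |batch_size|-th position, B yields no batches, both defensible degenerate readings).
-- outside the precondition, e.g. on generator_for_tagging(['a', 'b'], -2, 1): A returns [([], [], [])], B returns []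
import Mathlib
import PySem

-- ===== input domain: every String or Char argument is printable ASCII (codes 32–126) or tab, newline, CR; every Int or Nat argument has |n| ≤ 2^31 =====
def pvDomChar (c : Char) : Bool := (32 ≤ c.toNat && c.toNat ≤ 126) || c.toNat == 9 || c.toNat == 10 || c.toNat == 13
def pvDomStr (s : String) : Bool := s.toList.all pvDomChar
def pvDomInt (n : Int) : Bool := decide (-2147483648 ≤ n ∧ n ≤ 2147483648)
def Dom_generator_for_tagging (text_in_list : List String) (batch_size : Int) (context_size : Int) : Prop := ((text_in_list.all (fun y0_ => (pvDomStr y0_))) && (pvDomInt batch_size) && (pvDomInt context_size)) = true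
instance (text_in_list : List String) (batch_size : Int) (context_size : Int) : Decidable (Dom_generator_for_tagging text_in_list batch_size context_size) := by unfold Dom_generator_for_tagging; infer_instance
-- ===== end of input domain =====

-- B re-decomposes A's nested batch loop into one flat per-token pass plus a separate regrouping
-- pass stepping over the flat list in batch_size strides; same yielded values (return-value
-- equivalence of the listed generator) on positive batch_size.

-- ===== PORT A =====
-- loop body of A's inner 'for x in range(batch_size)' (try/except IndexError = pyGet? none)
def pvStepA (t : List String) (c : Int) (z : Int)
    (s : List String × List (List String) × List (List String)) (x : Int) :
    List String × List (List String) × List (List String) :=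
  let y := z + x
  match PySem.List.pyGet? t y with
  | none => s
  | some token =>
    let tokens := s.1 ++ [token]
    let context_left :=
      if y - c < 0 then
        PySem.List.slice t (some (y - c)) none ++ PySem.List.slice t none (some y)
      else
        PySem.List.slice t (some (y - c)) (some y)
    let context_right :=
      if y + c ≤ (t.length : Int) then
        PySem.List.slice t (some y) (some (y + c))
      else
        PySem.List.slice t (some y) none ++
          PySem.List.slice t none (some (c - ((t.length : Int) - y)))
    (tokens, s.2.1 ++ [context_left], s.2.2 ++ [context_right])

def generator_for_tagging (text_in_list : List String) (batch_size : Int) (context_size : Int) :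
    List (List String × List (List String) × List (List String)) :=
  (PySem.List.pyRange 0 (text_in_list.length : Int) 1).foldl
    (fun acc z =>
      if PySem.Int.mod z batch_size = 0 then
        acc ++ [(PySem.List.pyRange 0 batch_size 1).foldl
                  (pvStepA text_in_list context_size z) ([], [], [])]
      else acc) []

-- ===== PORT B =====
-- B's helper _windows(text_in_list, y, context_size)
def pvWindows (t : List String) (y : Int) (c : Int) : List String × List String :=
  let left :=
    if y - c < 0 then
      PySem.List.slice t (some (y - c)) none ++ PySem.List.slice t none (some y)
    else
      PySem.List.slice t (some (y - c)) (some y)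
  let right :=
    if y + c ≤ (t.length : Int) then
      PySem.List.slice t (some y) (some (y + c))
    else
      PySem.List.slice t (some y) none ++
        PySem.List.slice t none (some (c - ((t.length : Int) - y)))
  (left, right)

-- B's first pass: flat = [(token, left, right) for y, token in enumerate(text_in_list)]
def pvFlat (t : List String) (c : Int) : List (String × List String × List String) :=
  (PySem.List.enumerate t).map (fun p =>
    let w := pvWindows t p.1 c
    (p.2, w.1, w.2))

def generator_for_tagging_alt (text_in_list : List String) (batch_size : Int) (context_size : Int) :
    List (List String × List (List String) × List (List String)) :=
  let flat := pvFlat text_in_list context_size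
  (PySem.List.pyRange 0 (flat.length : Int) batch_size).foldl
    (fun acc i =>
      let chunk := PySem.List.slice flat (some i) (some (i + batch_size))
      acc ++ [(chunk.map (·.1), chunk.map (·.2.1), chunk.map (·.2.2))]) []

-- ===== PRECONDITION & SPEC =====
-- Pre_ restricts batch_size to positive counts, the function's natural domain: at batch_size == 0
-- A raises ZeroDivisionError on nonempty input, and for negative batch_size neither behaviour is
-- specified — A yields an empty triple at every |batch_size|-th position while B yields no batches,
-- both defensible degenerate readings of a nonsensical batch size; the empty input is kept for
-- every nonzero batch_size.
def Pre_generator_for_tagging (text_in_list : List String) (batch_size : Int) (context_size : Int) : Prop :=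
  1 ≤ batch_size ∨ (text_in_list = [] ∧ batch_size ≠ 0)
instance (text_in_list : List String) (batch_size : Int) (context_size : Int) : Decidable (Pre_generator_for_tagging text_in_list batch_size context_size) := by unfold Pre_generator_for_tagging; infer_instance

def pvWitness_generator_for_tagging : List String × Int × Int := (["a", "b", "c"], 2, 1)

def Spec_generator_for_tagging (text_in_list : List String) (batch_size : Int) (context_size : Int) (out : List (List String × List (List String) × List (List String))) : Prop := out = generator_for_tagging_alt text_in_list batch_size context_size
instance (text_in_list : List String) (batch_size : Int) (context_size : Int) (out : List (List String × List (List String) × List (List String))) : Decidable (Spec_generator_for_tagging text_in_list batch_size context_size out) := by unfold Spec_generator_for_tagging; infer_instance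

-- ===== CLAIM (what is proved, stated in full; the proofs are below) =====
def Claim_equal_generator_for_tagging : Prop := ∀ (text_in_list : List String) (batch_size : Int) (context_size : Int), Dom_generator_for_tagging text_in_list batch_size context_size → Pre_generator_for_tagging text_in_list batch_size context_size → Spec_generator_for_tagging text_in_list batch_size context_size (generator_for_tagging text_in_list batch_size context_size)

-- ===== LEMMAS AND PROOFS =====

lemma pvFlat_length (t : List String) (c : Int) : (pvFlat t c).length = t.length := by
  simp [pvFlat, PySem.List.length_enumerate]

lemma pvFlat_getElem? (t : List String) (c : Int) (j : Nat) :
    (pvFlat t c)[j]? = t[j]?.map (fun x => (x, pvWindows t (j : Int) c)) := by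
  cases h : t[j]? <;> simp [pvFlat, PySem.List.getElem?_enumerate, h]

lemma inner_eq (t : List String) (c : Int) (k d : Nat)
    (ts : List String) (ls rs : List (List String)) :
    (PySem.List.pyRange 0 (d : Int) 1).foldl (pvStepA t c (k : Int)) (ts, ls, rs) =
      (ts ++ (((pvFlat t c).drop k).take d).map (·.1),
       ls ++ (((pvFlat t c).drop k).take d).map (·.2.1),
       rs ++ (((pvFlat t c).drop k).take d).map (·.2.2)) := by
  induction d generalizing ts ls rs with
  | zero =>
      rw [show ((0 : Nat) : Int) = 0 from rfl, PySem.List.pyRange_one_eq_nil le_rfl]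
      simp
  | succ d ih =>
      rw [show ((d + 1 : Nat) : Int) = ((d : Nat) : Int) + 1 by push_cast; ring,
        PySem.List.pyRange_one_succ_right (by positivity), List.foldl_append, ih]
      simp only [List.foldl_cons, List.foldl_nil]
      have hdk := pvFlat_getElem? t c (k + d)
      by_cases h : k + d < t.length
      · have ht : t[k + d]? = some t[k + d] := List.getElem?_eq_getElem h
        have hy : PySem.List.pyGet? t ((k : Int) + (d : Int)) = some t[k + d] := by
          rw [show ((k : Int) + (d : Int)) = ((k + d : Nat) : Int) by push_cast; ring,
            PySem.List.pyGet?_natCast]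
          exact ht
        simp only [List.take_add_one, List.getElem?_drop, hdk, ht, Option.map_some]
        simp only [pvStepA, pvWindows, hy]
        push_cast
        simp
      · have ht : t[k + d]? = none := by
          simp; omega
        have hy : PySem.List.pyGet? t ((k : Int) + (d : Int)) = none := by
          rw [show ((k : Int) + (d : Int)) = ((k + d : Nat) : Int) by push_cast; ring,
            PySem.List.pyGet?_natCast]
          exact ht
        simp only [List.take_add_one, List.getElem?_drop, hdk, ht, Option.map_none]
        simp [pvStepA, hy]

-- the stepped range B iterates over is exactly the mod-guard filter of A's unit range
lemma filter_range_eq (n b : Int) (hb : 0 < b) :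
    (PySem.List.pyRange 0 n 1).filter (fun z => decide (PySem.Int.mod z b = 0)) =
      PySem.List.pyRange 0 n b := by
  have hpw1 : ((PySem.List.pyRange 0 n 1).filter
      (fun z => decide (PySem.Int.mod z b = 0))).Pairwise (· < ·) :=
    List.Pairwise.sublist List.filter_sublist (PySem.List.pairwise_lt_pyRange_one 0 n)
  have hpwb : (PySem.List.pyRange 0 n b).Pairwise (· < ·) := by
    rw [PySem.List.pyRange_of_pos 0 n hb]
    exact (List.pairwise_lt_range).map _ (by intro a c h; nlinarith)
  have hmem : ∀ z, z ∈ (PySem.List.pyRange 0 n 1).filter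
      (fun z => decide (PySem.Int.mod z b = 0)) ↔ z ∈ PySem.List.pyRange 0 n b := by
    intro z
    rw [List.mem_filter, PySem.List.mem_pyRange_one, decide_eq_true_eq,
      PySem.Int.mod_eq_zero_iff_dvd, PySem.List.mem_pyRange_iff_of_pos hb]
    constructor
    · rintro ⟨⟨h1, h2⟩, h3⟩; exact ⟨h1, h2, by simpa using h3⟩
    · rintro ⟨h1, h2, h3⟩; exact ⟨⟨h1, h2⟩, by simpa using h3⟩
  have hperm := (List.perm_ext_iff_of_nodup hpw1.nodup hpwb.nodup).mpr hmem
  exact List.Perm.eq_of_pairwise (fun a c _ _ h1 h2 => absurd h2 (asymm h1))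
    hpw1 hpwb hperm

-- ===== VERDICT (by name: the statement is the Claim_ definition above) =====
theorem generator_for_tagging_spec : Claim_equal_generator_for_tagging := by
  intro t b c _ hpre
  unfold Spec_generator_for_tagging
  simp only [generator_for_tagging, generator_for_tagging_alt]
  rw [pvFlat_length]
  rcases hpre with hb | ⟨ht, hb⟩
  · have hb' : 0 < b := hb
    have hA := PySem.List.foldl_append_if
      (fun z => decide (PySem.Int.mod z b = 0))
      (fun z => (PySem.List.pyRange 0 b 1).foldl (pvStepA t c z) ([], [], []))
      (PySem.List.pyRange 0 (t.length : Int) 1) []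
    simp only [decide_eq_true_eq] at hA
    rw [hA, filter_range_eq _ _ hb',
      PySem.List.foldl_append_singleton_eq_map
        (fun i => ((PySem.List.slice (pvFlat t c) (some i) (some (i + b))).map (·.1),
          (PySem.List.slice (pvFlat t c) (some i) (some (i + b))).map (·.2.1),
          (PySem.List.slice (pvFlat t c) (some i) (some (i + b))).map (·.2.2)))]
    simp only [List.nil_append]
    refine List.map_congr_left ?_
    intro z hz
    obtain ⟨hz0, -, -⟩ := (PySem.List.mem_pyRange_iff_of_pos hb' z).mp hz
    obtain ⟨k, rfl⟩ : ∃ k : Nat, z = (k : Int) := ⟨z.toNat, (Int.toNat_of_nonneg hz0).symm⟩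
    rw [show ((k : Int) + b) = ((k : Int) + (b.toNat : Int)) by
        rw [Int.toNat_of_nonneg (le_of_lt hb')], PySem.List.slice_natCast_add]
    rw [show (PySem.List.pyRange 0 b 1) = (PySem.List.pyRange 0 (b.toNat : Int) 1) by
        rw [Int.toNat_of_nonneg (le_of_lt hb')]]
    rw [inner_eq t c k b.toNat [] [] []]
    simp
  · subst ht
    simp [pvFlat, PySem.List.enumerate, PySem.List.pyRange]
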